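-- pv_equiv track=rewrite | github.com/zxfengmumu/python-taobao | core/http_client.py | mask_sensitive_text
-- ===== SOURCE A (Python) =====
-- def mask_sensitive_text(text):
--     """对纯文本响应进行粗粒度脱敏。"""
--     if not isinstance(text, str):
--         return text
--     masked = text
--     for key in ("password", "token", "authorization", "cookie", "set-cookie"):
--         masked = masked.replace(f'"{key}":"', f'"{key}":"***')
--         masked = masked.replace(f'"{key}": "', f'"{key}": "***')
--     return masked
-- ===== SOURCE B (Python) =====
-- KEYS = ("password", "token", "authorization", "cookie", "set-cookie")
-- PATTERNS = tuple(p for k in KEYS for p in (f'"{k}":"', f'"{k}": "'))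
--
--
-- def mask_sensitive_text(text):
--     """对纯文本响应进行粗粒度脱敏。"""
--     if not isinstance(text, str):
--         return text
--     out = []
--     i = 0
--     n = len(text)
--     while i < n:
--         for p in PATTERNS:
--             if text.startswith(p, i):
--                 out.append(p)
--                 out.append('***')
--                 i += len(p)
--                 break
--         else:
--             out.append(text[i])
--             i += 1
--     return ''.join(out)
-- ===== Notes on version B (the rewrite author's own statement) =====
-- stated objective: alternative
-- what changed: Replaces A's ten sequential full-string .replace passes (two per key) with a single left-to-right scan that tries the ten key patterns at each position and emits '***' after each match; Pre_ excludes texts containing two overlapping key patterns (sharing a boundary quote), where A's output depends on its incidental key iteration order.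
import Mathlib
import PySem

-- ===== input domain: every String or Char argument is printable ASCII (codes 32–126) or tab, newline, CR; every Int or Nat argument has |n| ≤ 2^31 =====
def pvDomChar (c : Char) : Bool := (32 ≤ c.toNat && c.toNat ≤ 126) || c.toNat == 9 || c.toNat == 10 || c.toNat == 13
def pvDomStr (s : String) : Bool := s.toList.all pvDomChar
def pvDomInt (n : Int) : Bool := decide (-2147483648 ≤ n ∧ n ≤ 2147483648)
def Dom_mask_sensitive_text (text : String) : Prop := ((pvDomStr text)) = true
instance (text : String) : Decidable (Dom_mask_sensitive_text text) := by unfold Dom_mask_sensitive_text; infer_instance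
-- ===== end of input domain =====

-- B replaces A's ten sequential full-string .replace passes by ONE left-to-right scan trying the
-- ten key patterns at each position (objective: alternative, single pass instead of ten passes).

-- ===== PORT A =====
def mask_sensitive_text (text : String) : String :=
  (["password", "token", "authorization", "cookie", "set-cookie"] : List String).foldl
    (fun masked key =>
      let m1 := PySem.Str.replace masked ("\"" ++ key ++ "\":\"") ("\"" ++ key ++ "\":\"***")
      PySem.Str.replace m1 ("\"" ++ key ++ "\": \"") ("\"" ++ key ++ "\": \"***"))
    text

-- ===== PORT B =====
def pvStars : List Char := ['*', '*', '*']

def pvPats : List (List Char) :=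
  ["\"password\":\"".toList, "\"password\": \"".toList,
   "\"token\":\"".toList, "\"token\": \"".toList,
   "\"authorization\":\"".toList, "\"authorization\": \"".toList,
   "\"cookie\":\"".toList, "\"cookie\": \"".toList,
   "\"set-cookie\":\"".toList, "\"set-cookie\": \"".toList]

def pvFindPat (cs : List Char) : Option (List Char) :=
  pvPats.find? (fun p => p.isPrefixOf cs)

def pvScan : List Char → List Char
  | [] => []
  | c :: cs =>
    match pvFindPat (c :: cs) with
    | some p => p ++ pvStars ++ pvScan (cs.drop (p.length - 1))
    | none => c :: pvScan cs
  termination_by cs => cs.length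
  decreasing_by all_goals simp [List.length_drop]

def mask_sensitive_text_alt (text : String) : String :=
  String.ofList (pvScan text.toList)

-- ===== PRECONDITION & SPEC =====
def pvForbidden : List (List Char) :=
  pvPats.flatMap (fun p => pvPats.map (fun q => p ++ q.drop 1))

-- Pre_ excludes texts in which two sensitive-key patterns OVERLAP (the closing quote of one is the
-- opening quote of the next, e.g. '"token":"password":"'): there A's result is an accident of its
-- key iteration order and no single-pass reading matches it.
def Pre_mask_sensitive_text (text : String) : Prop :=
  ∀ f ∈ pvForbidden, ¬ f <:+: text.toList
instance (text : String) : Decidable (Pre_mask_sensitive_text text) := by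
  unfold Pre_mask_sensitive_text; infer_instance

def pvWitness_mask_sensitive_text : String := "\"k\": \"v\""

def Spec_mask_sensitive_text (text : String) (out : String) : Prop := out = mask_sensitive_text_alt text
instance (text : String) (out : String) : Decidable (Spec_mask_sensitive_text text out) := by
  unfold Spec_mask_sensitive_text; infer_instance

-- ===== CLAIM (what is proved, stated in full; the proofs are below) =====
def Claim_equal_mask_sensitive_text : Prop := ∀ (text : String), Dom_mask_sensitive_text text → Pre_mask_sensitive_text text → Spec_mask_sensitive_text text (mask_sensitive_text text)

-- ===== LEMMAS AND PROOFS =====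

-- Python str.replace(old, new) as a structural scan (old ≠ []).
def pvRepl (old new : List Char) : List Char → List Char
  | [] => []
  | c :: cs =>
    if old.isPrefixOf (c :: cs) then new ++ pvRepl old new (cs.drop (old.length - 1))
    else c :: pvRepl old new cs
  termination_by cs => cs.length
  decreasing_by all_goals simp [List.length_drop]

def pvFold (ps : List (List Char)) (cs : List Char) : List Char :=
  ps.foldl (fun s p => pvRepl p (p ++ pvStars) s) cs

theorem pvBridge_go (old new : List Char) (hold : old ≠ []) :
    ∀ fuel l acc, l.length ≤ fuel →
      PySem.Chars.replace.go old new fuel l acc = acc.reverse ++ pvRepl old new l := by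
  intro fuel
  induction fuel with
  | zero =>
    intro l acc hl
    have : l = [] := List.eq_nil_of_length_eq_zero (Nat.le_zero.mp hl)
    subst this
    rw [PySem.Chars.replace.go]
    simp [pvRepl]
  | succ f ih =>
    intro l acc hl
    cases l with
    | nil =>
      rw [PySem.Chars.replace.go]
      simp [pvRepl]
      omega
    | cons c t =>
      rw [PySem.Chars.replace.go]
      by_cases hp : old.isPrefixOf (c :: t)
      · rw [if_pos hp]
        obtain ⟨k, hk⟩ : ∃ k, old.length = k + 1 := by
          cases old with
          | nil => exact absurd rfl hold
          | cons a b => exact ⟨b.length, rfl⟩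
        have hdrop : List.drop old.length (c :: t) = t.drop (old.length - 1) := by
          rw [hk]; simp
        have hlen : (List.drop old.length (c :: t)).length ≤ f := by
          simp at hl ⊢; omega
        rw [ih _ _ hlen, hdrop]
        have hP : pvRepl old new (c :: t) =
            new ++ pvRepl old new (t.drop (old.length - 1)) := by
          rw [pvRepl, if_pos hp]
        rw [hP]
        simp
      · rw [if_neg hp]
        have hlen : t.length ≤ f := by simp at hl; omega
        rw [ih _ _ hlen]
        have hP : pvRepl old new (c :: t) = c :: pvRepl old new t := by
          rw [pvRepl, if_neg hp]
        rw [hP]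
        simp

theorem pvBridge (old new l : List Char) (hold : old ≠ []) :
    PySem.Chars.replace l old new = pvRepl old new l := by
  rw [PySem.Chars.replace]
  rw [if_neg (by simpa [List.isEmpty_iff] using hold)]
  simpa using pvBridge_go old new hold l.length l [] le_rfl

-- decidable facts about the fixed pattern list
theorem pvPats_len2 : ∀ p ∈ pvPats, 2 ≤ p.length := by decide

theorem pvPats_star : ∀ p ∈ pvPats, '*' ∉ p := by decide

theorem pvPats_nodup : pvPats.Nodup := by decide

theorem pvPats_not_prefix : ∀ p ∈ pvPats, ∀ q ∈ pvPats, p ≠ q → ¬ p <+: q := by decide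

theorem pvPats_last : ∀ p ∈ pvPats, p.drop (p.length - 1) = ['"'] := by decide

theorem pvPats_compat : ∀ p ∈ pvPats, ∀ q ∈ pvPats, ∀ j ∈ List.range p.length,
    1 ≤ j → j + 2 ≤ p.length → ¬ (q.take (p.length - j)) <+: p.drop j := by decide

theorem pvRepl_nil (old new : List Char) : pvRepl old new [] = [] := by rw [pvRepl]

theorem pvRepl_skip (old new : List Char) (c : Char) (cs : List Char) (h : ¬ old <+: (c :: cs)) :
    pvRepl old new (c :: cs) = c :: pvRepl old new cs := by
  rw [pvRepl, if_neg (by simpa [List.isPrefixOf_iff_prefix] using h)]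

theorem pvRepl_match (old new : List Char) (c : Char) (cs : List Char) (h : old <+: (c :: cs)) :
    pvRepl old new (c :: cs) = new ++ pvRepl old new (cs.drop (old.length - 1)) := by
  rw [pvRepl, if_pos (by simpa [List.isPrefixOf_iff_prefix] using h)]

theorem pvFold_nil_list (ps : List (List Char)) : pvFold ps [] = [] := by
  induction ps with
  | nil => rfl
  | cons q ps ih => simpa [pvFold, List.foldl, pvRepl_nil] using ih

theorem pvFold_cons (q : List Char) (ps : List (List Char)) (x : List Char) :
    pvFold (q :: ps) x = pvFold ps (pvRepl q (q ++ pvStars) x) := rfl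

theorem pvFold_append (l₁ l₂ : List (List Char)) (x : List Char) :
    pvFold (l₁ ++ l₂) x = pvFold l₂ (pvFold l₁ x) := by
  simp [pvFold, List.foldl_append]

theorem pvRepl_split (old new : List Char) :
    ∀ u v : List Char, (∀ j < u.length, ¬ old <+: (u ++ v).drop j) →
    pvRepl old new (u ++ v) = u ++ pvRepl old new v := by
  intro u
  induction u with
  | nil => intro v _; simp
  | cons a u ih =>
    intro v h
    have h0 : ¬ old <+: (a :: (u ++ v)) := by simpa using h 0 (by simp)
    rw [List.cons_append, pvRepl_skip _ _ _ _ h0, ih]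
    · simp
    · intro j hj
      simpa using h (j + 1) (by simp; omega)

theorem pvPull (p : List Char) (_hp : p ∈ pvPats) :
    ∀ n : Nat, ∀ x : List Char, x.length ≤ n → ∀ s : List Char, '*' ∉ s →
      s <+: pvRepl p (p ++ pvStars) x → s <+: x := by
  intro n
  induction n with
  | zero =>
    intro x hx s hs hpre
    have : x = [] := List.eq_nil_of_length_eq_zero (Nat.le_zero.mp hx)
    subst this
    rwa [pvRepl_nil] at hpre
  | succ m ih =>
    intro x hx s hs hpre
    cases x with
    | nil => rwa [pvRepl_nil] at hpre
    | cons c t =>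
      by_cases hm : p <+: (c :: t)
      · rw [pvRepl_match _ _ _ _ hm, List.append_assoc] at hpre
        have hp2 : p <+: p ++ (pvStars ++ pvRepl p (p ++ pvStars) (t.drop (p.length - 1))) :=
          List.prefix_append _ _
        rcases List.prefix_or_prefix_of_prefix hpre hp2 with h1 | h1
        · exact h1.trans hm
        · obtain ⟨s', rfl⟩ := h1
          rw [List.prefix_append_right_inj] at hpre
          cases s' with
          | nil => rw [List.append_nil]; exact hm
          | cons a s'' =>
            rw [show pvStars ++ pvRepl p (p ++ pvStars) (t.drop (p.length - 1)) =
                  '*' :: ('*' :: '*' :: pvRepl p (p ++ pvStars) (t.drop (p.length - 1))) from rfl,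
                List.cons_prefix_cons] at hpre
            exact ((hs (by simp [hpre.1])).elim)
      · rw [pvRepl_skip _ _ _ _ hm] at hpre
        cases s with
        | nil => exact List.nil_prefix
        | cons a s'' =>
          rw [List.cons_prefix_cons] at hpre
          have : s'' <+: t := by
            refine ih t (by simpa using Nat.lt_succ_iff.mp (Nat.lt_of_lt_of_le (by simp) hx)) s''
              (fun hmem => hs (by simp [hmem])) hpre.2
          rw [List.cons_prefix_cons]
          exact ⟨hpre.1, this⟩

theorem pvTakePrefix {s y : List Char} (n : Nat) (h : s <+: y) : s.take n <+: y.take n := by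
  obtain ⟨t, rfl⟩ := h
  rw [List.take_append]
  exact List.prefix_append _ _

theorem pvNoOcc (p q x : List Char) (hp : p ∈ pvPats) (hq : q ∈ pvPats) (hne : q ≠ p)
    (hpx : p <+: x) (hchain : ¬ (p ++ q.drop 1) <+: x) :
    ∀ j < p.length, ¬ q <+: x.drop j := by
  intro j hj hqx
  obtain ⟨r, rfl⟩ := hpx
  rcases Nat.lt_or_ge j 1 with h1 | h1
  · -- j = 0
    interval_cases j
    simp at hqx
    rcases List.prefix_or_prefix_of_prefix hqx (List.prefix_append p r) with h | h
    · exact pvPats_not_prefix q hq p hp hne h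
    · exact pvPats_not_prefix p hp q hq (fun e => hne e.symm) h
  rcases Nat.lt_or_ge (j + 1) p.length with h2 | h2
  · -- 1 ≤ j, j + 2 ≤ p.length : mismatch inside p
    have hdrop : (p ++ r).drop j = p.drop j ++ r := List.drop_append_of_le_length (by omega)
    rw [hdrop] at hqx
    have htk := pvTakePrefix (p.length - j) hqx
    rw [List.take_append] at htk
    simp only [List.length_drop, Nat.sub_self, List.take_zero, List.append_nil] at htk
    rw [List.take_of_length_le (l := List.drop j p) (by simp)] at htk
    exact pvPats_compat p hp q hq j (List.mem_range.mpr hj) h1 (by omega) htk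
  · -- j = p.length - 1 : the chain case
    have hj' : j = p.length - 1 := by omega
    subst hj'
    have hdrop : (p ++ r).drop (p.length - 1) = p.drop (p.length - 1) ++ r :=
      List.drop_append_of_le_length (by omega)
    rw [hdrop, pvPats_last p hp] at hqx
    cases q with
    | nil => have := pvPats_len2 [] hq; simp at this
    | cons q0 q' =>
      rw [show (['"'] ++ r : List Char) = '"' :: r from rfl, List.cons_prefix_cons] at hqx
      exact hchain (by simpa [List.prefix_append_right_inj] using hqx.2)

theorem pvDropOne_star (q : List Char) (hq : q ∈ pvPats) : '*' ∉ q.drop 1 :=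
  fun h => pvPats_star q hq (List.drop_subset _ _ h)

theorem pvDropOne_ne_nil (q : List Char) (hq : q ∈ pvPats) : q.drop 1 ≠ [] := by
  intro h
  rw [List.drop_eq_nil_iff] at h
  have := pvPats_len2 q hq
  omega

theorem pvChainFree_stars (q v : List Char) (hq : q ∈ pvPats) :
    ¬ q.drop 1 <+: pvStars ++ v := by
  intro h
  cases hd : q.drop 1 with
  | nil => exact pvDropOne_ne_nil q hq hd
  | cons a s =>
    rw [hd, show (pvStars ++ v : List Char) = '*' :: ('*' :: '*' :: v) from rfl,
        List.cons_prefix_cons] at h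
    exact pvPats_star q hq (by
      have : a ∈ q.drop 1 := by simp [hd]
      exact List.drop_subset _ _ (h.1 ▸ this))

theorem pvDropAppend (u w : List Char) (k : Nat) : (u ++ w).drop (u.length + k) = w.drop k := by
  induction u with
  | nil => simp
  | cons a u ih => simp [Nat.succ_add, ih]

theorem pvPostNoOcc (p q v : List Char) (hp : p ∈ pvPats) (hq : q ∈ pvPats) (hne : q ≠ p) :
    ∀ j < p.length + 3, ¬ q <+: ((p ++ pvStars) ++ v).drop j := by
  intro j hj hqx
  rw [List.append_assoc] at hqx
  rcases Nat.lt_or_ge j p.length with h1 | h1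
  · refine pvNoOcc p q (p ++ (pvStars ++ v)) hp hq hne (List.prefix_append _ _) ?_ j h1 hqx
    intro hc
    rw [List.prefix_append_right_inj] at hc
    exact pvChainFree_stars q v hq hc
  · obtain ⟨k, rfl⟩ : ∃ k, j = p.length + k := ⟨j - p.length, by omega⟩
    rw [pvDropAppend] at hqx
    have hstar : ∃ w, (pvStars ++ v).drop k = '*' :: w := by
      have hk : k < 3 := by omega
      interval_cases k
      · exact ⟨'*' :: '*' :: v, rfl⟩
      · exact ⟨'*' :: v, rfl⟩
      · exact ⟨v, rfl⟩
    obtain ⟨w, hw⟩ := hstar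
    rw [hw] at hqx
    cases q with
    | nil => have := pvPats_len2 [] hq; simp at this
    | cons q0 q' =>
      rw [List.cons_prefix_cons] at hqx
      exact pvPats_star _ hq (by simp [hqx.1])

theorem pvPreFold (p : List Char) (hp : p ∈ pvPats) :
    ∀ ps : List (List Char), (∀ q ∈ ps, q ∈ pvPats ∧ q ≠ p) →
    ∀ v : List Char, (∀ q ∈ pvPats, ¬ (q.drop 1) <+: v) →
    pvFold ps (p ++ v) = p ++ pvFold ps v := by
  intro ps
  induction ps with
  | nil => intro _ v _; rfl
  | cons q ps ih =>
    intro hq v hv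
    obtain ⟨hqm, hqne⟩ := hq q (by simp)
    have hside : ∀ j < p.length, ¬ q <+: (p ++ v).drop j :=
      pvNoOcc p q (p ++ v) hp hqm hqne (List.prefix_append _ _)
        (fun hc => hv q hqm (by rwa [List.prefix_append_right_inj] at hc))
    rw [pvFold_cons, pvRepl_split q (q ++ pvStars) p v hside, pvFold_cons]
    exact ih (fun r hr => hq r (by simp [hr])) (pvRepl q (q ++ pvStars) v)
      (fun r hr hpre => hv r hr (pvPull q hqm v.length v le_rfl _ (pvDropOne_star r hr) hpre))

theorem pvPostFold (p : List Char) (hp : p ∈ pvPats) :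
    ∀ ps : List (List Char), (∀ q ∈ ps, q ∈ pvPats ∧ q ≠ p) →
    ∀ v : List Char, pvFold ps ((p ++ pvStars) ++ v) = (p ++ pvStars) ++ pvFold ps v := by
  intro ps
  induction ps with
  | nil => intro _ v; rfl
  | cons q ps ih =>
    intro hq v
    obtain ⟨hqm, hqne⟩ := hq q (by simp)
    have hside : ∀ j < (p ++ pvStars).length, ¬ q <+: ((p ++ pvStars) ++ v).drop j := by
      intro j hj
      exact pvPostNoOcc p q v hp hqm hqne j (by simpa [pvStars] using hj)
    rw [pvFold_cons, pvRepl_split q (q ++ pvStars) (p ++ pvStars) v hside, pvFold_cons]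
    exact ih (fun r hr => hq r (by simp [hr])) (pvRepl q (q ++ pvStars) v)

theorem pvNoneFold : ∀ ps : List (List Char), (∀ q ∈ ps, q ∈ pvPats) →
    ∀ (c : Char) (x : List Char), (∀ q ∈ pvPats, ¬ q <+: (c :: x)) →
    pvFold ps (c :: x) = c :: pvFold ps x := by
  intro ps
  induction ps with
  | nil => intro _ c x _; rfl
  | cons q ps ih =>
    intro hmem c x h
    rw [pvFold_cons, pvRepl_skip _ _ _ _ (h q (hmem q (by simp))), pvFold_cons]
    refine ih (fun r hr => hmem r (by simp [hr])) c (pvRepl q (q ++ pvStars) x) ?_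
    intro r hr hpre
    cases r with
    | nil => exact h [] hr List.nil_prefix
    | cons a r' =>
      rw [List.cons_prefix_cons] at hpre
      have hr'x : r' <+: x := pvPull q (hmem q (by simp)) x.length x le_rfl r'
        (fun hm => pvPats_star _ hr (by simp [hm])) hpre.2
      exact h (a :: r') hr (by rw [List.cons_prefix_cons]; exact ⟨hpre.1, hr'x⟩)

theorem pvScan_nil : pvScan [] = [] := by rw [pvScan]

theorem pvScan_none (c : Char) (x : List Char) (h : pvFindPat (c :: x) = none) :
    pvScan (c :: x) = c :: pvScan x := by rw [pvScan, h]

theorem pvScan_some (c : Char) (x p : List Char) (h : pvFindPat (c :: x) = some p) :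
    pvScan (c :: x) = p ++ pvStars ++ pvScan (x.drop (p.length - 1)) := by rw [pvScan, h]

-- main correspondence
theorem pvMain : ∀ n : Nat, ∀ x : List Char, x.length ≤ n →
    (∀ f ∈ pvForbidden, ¬ f <:+: x) → pvFold pvPats x = pvScan x := by
  intro n
  induction n with
  | zero =>
    intro x hx _
    have : x = [] := List.eq_nil_of_length_eq_zero (Nat.le_zero.mp hx)
    subst this
    rw [pvScan_nil, pvFold_nil_list]
  | succ m ih =>
    intro x hx hch
    cases x with
    | nil => rw [pvScan_nil, pvFold_nil_list]
    | cons c t =>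
      cases hf : pvFindPat (c :: t) with
      | none =>
        have hnp : ∀ q ∈ pvPats, ¬ q <+: (c :: t) := by
          intro q hq hpre
          rw [pvFindPat] at hf
          have := List.find?_eq_none.mp hf q hq
          simp only [List.isPrefixOf_iff_prefix] at this
          exact this hpre
        rw [pvScan_none _ _ hf, pvNoneFold pvPats (fun q h => h) c t hnp,
            ih t (by simp at hx; omega) (fun f hf' hinf => hch f hf' (List.infix_cons hinf))]
      | some p =>
        have hpm : p ∈ pvPats := by
          rw [pvFindPat] at hf; exact List.mem_of_find?_eq_some hf
        have hppref : p <+: (c :: t) := by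
          rw [pvFindPat] at hf
          have := List.find?_some hf
          simpa [List.isPrefixOf_iff_prefix] using this
        obtain ⟨r, hr⟩ := hppref
        have hL : 2 ≤ p.length := pvPats_len2 p hpm
        obtain ⟨k, hk⟩ : ∃ k, p.length = k + 1 := ⟨p.length - 1, by omega⟩
        have hr' : t.drop (p.length - 1) = r := by
          have h1 : (c :: t).drop p.length = r := by rw [← hr]; exact List.drop_left' rfl
          rw [hk] at h1
          rw [hk]
          simpa using h1
        have hlenr : r.length ≤ m := by
          have : p.length + r.length = t.length + 1 := by
            have := congrArg List.length hr
            simpa using this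
          simp at hx; omega
        have hsuf : r <:+ (c :: t) := ⟨p, hr⟩
        have hchr : ∀ f ∈ pvForbidden, ¬ f <:+: r :=
          fun f hf' hinf => hch f hf' (hinf.trans hsuf.isInfix)
        have hvr : ∀ q ∈ pvPats, ¬ q.drop 1 <+: r := by
          intro q hq hpre
          refine hch (p ++ q.drop 1) ?_ ?_
          · rw [pvForbidden]
            exact List.mem_flatMap.mpr ⟨p, hpm, List.mem_map.mpr ⟨q, hq, rfl⟩⟩
          · have : p ++ q.drop 1 <+: p ++ r := (List.prefix_append_right_inj p).mpr hpre
            rw [hr] at this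
            exact this.isInfix
        obtain ⟨pre, post, hsplit⟩ := List.append_of_mem hpm
        have hnodup := pvPats_nodup
        rw [hsplit] at hnodup
        have hdisj := List.disjoint_of_nodup_append hnodup
        have hpre_ne : ∀ q ∈ pre, q ∈ pvPats ∧ q ≠ p := by
          intro q hq
          refine ⟨by rw [hsplit]; exact List.mem_append.mpr (Or.inl hq), ?_⟩
          intro e; subst e
          exact hdisj hq (by simp)
        have hpost_ne : ∀ q ∈ post, q ∈ pvPats ∧ q ≠ p := by
          intro q hq
          refine ⟨by rw [hsplit]; exact List.mem_append.mpr (Or.inr (by simp [hq])), ?_⟩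
          intro e; subst e
          exact (List.nodup_cons.mp (hnodup.of_append_right)).1 hq
        have step2 : ∀ V : List Char,
            pvRepl p (p ++ pvStars) (p ++ V) = (p ++ pvStars) ++ pvRepl p (p ++ pvStars) V := by
          intro V
          cases p with
          | nil => simp at hL
          | cons p0 pp =>
            have hm : (p0 :: pp) <+: p0 :: (pp ++ V) := by
              rw [← List.cons_append]; exact List.prefix_append _ _
            simp only [List.cons_append]
            rw [pvRepl_match _ _ p0 (pp ++ V) hm]
            simp only [List.cons_append]
            rw [show (p0 :: pp).length - 1 = pp.length from by simp, List.drop_left]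
        calc pvFold pvPats (c :: t)
            = pvFold (p :: post) (pvFold pre (c :: t)) := by
              rw [hsplit, pvFold_append]
          _ = pvFold post (pvRepl p (p ++ pvStars) (p ++ pvFold pre r)) := by
              rw [pvFold_cons, ← hr, pvPreFold p hpm pre hpre_ne r hvr]
          _ = (p ++ pvStars) ++ pvFold post (pvRepl p (p ++ pvStars) (pvFold pre r)) := by
              rw [step2, pvPostFold p hpm post hpost_ne]
          _ = (p ++ pvStars) ++ pvFold pvPats r := by
              rw [hsplit, pvFold_append, pvFold_cons]
          _ = (p ++ pvStars) ++ pvScan r := by rw [ih r hlenr hchr]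
          _ = pvScan (c :: t) := by
              rw [pvScan_some _ _ _ hf, hr', List.append_assoc]

theorem pvA_toList (text : String) :
    (mask_sensitive_text text).toList = pvFold pvPats text.toList := by
  unfold mask_sensitive_text
  simp only [List.foldl]
  simp only [PySem.Str.toList_replace]
  repeat rw [pvBridge _ _ _ (by decide)]
  have ho0 : ("\"" ++ "password" ++ "\":\"" : String).toList = ("\"password\":\"" : String).toList := by decide
  have hn0 : ("\"" ++ "password" ++ "\":\"***" : String).toList = ("\"password\":\"" : String).toList ++ pvStars := by decide
  have ho1 : ("\"" ++ "password" ++ "\": \"" : String).toList = ("\"password\": \"" : String).toList := by decide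
  have hn1 : ("\"" ++ "password" ++ "\": \"***" : String).toList = ("\"password\": \"" : String).toList ++ pvStars := by decide
  have ho2 : ("\"" ++ "token" ++ "\":\"" : String).toList = ("\"token\":\"" : String).toList := by decide
  have hn2 : ("\"" ++ "token" ++ "\":\"***" : String).toList = ("\"token\":\"" : String).toList ++ pvStars := by decide
  have ho3 : ("\"" ++ "token" ++ "\": \"" : String).toList = ("\"token\": \"" : String).toList := by decide
  have hn3 : ("\"" ++ "token" ++ "\": \"***" : String).toList = ("\"token\": \"" : String).toList ++ pvStars := by decide
  have ho4 : ("\"" ++ "authorization" ++ "\":\"" : String).toList = ("\"authorization\":\"" : String).toList := by decide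
  have hn4 : ("\"" ++ "authorization" ++ "\":\"***" : String).toList = ("\"authorization\":\"" : String).toList ++ pvStars := by decide
  have ho5 : ("\"" ++ "authorization" ++ "\": \"" : String).toList = ("\"authorization\": \"" : String).toList := by decide
  have hn5 : ("\"" ++ "authorization" ++ "\": \"***" : String).toList = ("\"authorization\": \"" : String).toList ++ pvStars := by decide
  have ho6 : ("\"" ++ "cookie" ++ "\":\"" : String).toList = ("\"cookie\":\"" : String).toList := by decide
  have hn6 : ("\"" ++ "cookie" ++ "\":\"***" : String).toList = ("\"cookie\":\"" : String).toList ++ pvStars := by decide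
  have ho7 : ("\"" ++ "cookie" ++ "\": \"" : String).toList = ("\"cookie\": \"" : String).toList := by decide
  have hn7 : ("\"" ++ "cookie" ++ "\": \"***" : String).toList = ("\"cookie\": \"" : String).toList ++ pvStars := by decide
  have ho8 : ("\"" ++ "set-cookie" ++ "\":\"" : String).toList = ("\"set-cookie\":\"" : String).toList := by decide
  have hn8 : ("\"" ++ "set-cookie" ++ "\":\"***" : String).toList = ("\"set-cookie\":\"" : String).toList ++ pvStars := by decide
  have ho9 : ("\"" ++ "set-cookie" ++ "\": \"" : String).toList = ("\"set-cookie\": \"" : String).toList := by decide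
  have hn9 : ("\"" ++ "set-cookie" ++ "\": \"***" : String).toList = ("\"set-cookie\": \"" : String).toList ++ pvStars := by decide
  rw [ho0, hn0, ho1, hn1, ho2, hn2, ho3, hn3, ho4, hn4, ho5, hn5, ho6, hn6, ho7, hn7, ho8, hn8, ho9, hn9]
  rfl

-- ===== VERDICT (by name: the statement is the Claim_ definition above) =====
theorem mask_sensitive_text_spec : Claim_equal_mask_sensitive_text := by
  intro text _ hpre
  unfold Spec_mask_sensitive_text mask_sensitive_text_alt
  have h1 : (mask_sensitive_text text).toList = pvScan text.toList := by
    rw [pvA_toList]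
    exact pvMain text.toList.length text.toList le_rfl hpre
  calc mask_sensitive_text text
      = String.ofList (mask_sensitive_text text).toList := by simp
    _ = String.ofList (pvScan text.toList) := by rw [h1]
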